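-- pv_equiv track=rewrite | github.com/psanthosh07/365_days_of_code | Day108.py | solve
-- ===== SOURCE A (Python) =====
-- def solve(A):
--     color_count = {}
--
--     for color in A:
--         if color in color_count:
--             color_count[color] += 1
--         else:
--             color_count[color] = 1
--
--     pairs = 0
--     for count in color_count.values():
--         pairs += count // 2
--
--     return pairs
-- ===== SOURCE B (Python) =====
-- def solve(A):
--     s = sorted(A)
--     if not s:
--         return 0
--     pairs = 0
--     cur = s[0]
--     run = 1
--     for x in s[1:]:
--         if x == cur:
--             run += 1
--         else:
--             pairs += run // 2
--             cur = x
--             run = 1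
--     return pairs + run // 2
-- ===== Notes on version B (the rewrite author's own statement) =====
-- stated objective: alternative
-- what changed: Replaces the dict frequency table with sort-then-single-pass run-length grouping: sort A, scan adjacent equal runs, add run//2 when each run closes.
import Mathlib
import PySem

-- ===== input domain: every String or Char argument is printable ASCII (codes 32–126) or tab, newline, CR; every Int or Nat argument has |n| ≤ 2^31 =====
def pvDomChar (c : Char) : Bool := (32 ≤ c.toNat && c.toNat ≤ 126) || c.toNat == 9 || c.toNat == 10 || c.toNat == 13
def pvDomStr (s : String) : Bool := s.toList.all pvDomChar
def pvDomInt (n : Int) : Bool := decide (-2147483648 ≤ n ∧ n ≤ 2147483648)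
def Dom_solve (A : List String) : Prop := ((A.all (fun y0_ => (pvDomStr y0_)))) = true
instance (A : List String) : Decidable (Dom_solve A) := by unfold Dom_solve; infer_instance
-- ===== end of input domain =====

-- B replaces A's dict frequency table by sort + one pass over adjacent equal runs; same value, alternative decomposition (no speed claim).

-- ===== PORT A =====
def solve (A : List String) : Int :=
  let color_count : PySem.Dict String Int :=
    A.foldl (fun d color =>
      if d.contains color then d.modify color 0 (· + 1) else d.insert color 1)
      PySem.Dict.empty
  color_count.values.foldl (fun pairs count => pairs + PySem.Int.floordiv count 2) 0

-- ===== PORT B =====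
-- B's loop over s[1:] with state (cur, run, pairs); on exit adds the last run's run // 2
def bLoop : List String → String → Int → Int → Int
  | [], _, run, pairs => pairs + PySem.Int.floordiv run 2
  | x :: xs, cur, run, pairs =>
    if x == cur then bLoop xs cur (run + 1) pairs
    else bLoop xs x 1 (pairs + PySem.Int.floordiv run 2)

def solve_alt (A : List String) : Int :=
  match PySem.List.sorted A (fun x => x) false with
  | [] => 0
  | x :: xs => bLoop xs x 1 0

-- ===== PRECONDITION & SPEC =====
def Spec_solve (A : List String) (out : Int) : Prop := out = solve_alt A
instance (A : List String) (out : Int) : Decidable (Spec_solve A out) := by unfold Spec_solve; infer_instance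

-- ===== CLAIM (what is proved, stated in full; the proofs are below) =====
def Claim_equal_solve : Prop := ∀ (A : List String), Dom_solve A → Spec_solve A (solve A)

-- ===== LEMMAS AND PROOFS =====

-- the common mathematical value: sum over the distinct colors of count // 2
def pairsOf (t : List String) : Int :=
  ((PySem.Set.ofList t).map (fun k => PySem.Int.floordiv (t.count k : Int) 2)).sum

-- A-side: the if-contains update is exactly Counter's modify step
lemma modify_eq_insert_of_not_contains (d : PySem.Dict String Int) (c : String)
    (h : d.contains c = false) : d.modify c 0 (· + 1) = d.insert c 1 := by
  have h2 : d.get? c = none := by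
    simp only [PySem.Dict.get?, Option.map_eq_none_iff, List.find?_eq_none]
    intro p hp
    simp only [PySem.Dict.contains, List.any_eq_false] at h
    exact h p hp
  simp [PySem.Dict.modify, PySem.Dict.getD, h2]

lemma solve_eq_pairsOf (A : List String) : solve A = pairsOf A := by
  unfold solve
  have hstep : (fun (d : PySem.Dict String Int) color =>
      if d.contains color then d.modify color 0 (· + 1) else d.insert color 1)
      = fun d color => d.modify color 0 (· + 1) := by
    funext d c
    by_cases h : d.contains c
    · simp [h]
    · simp only [Bool.not_eq_true] at h
      simp [h, modify_eq_insert_of_not_contains d c h]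
  rw [hstep, ← PySem.Dict.counter_eq_foldl]
  show (PySem.Dict.counter A).values.foldl (fun pairs count => pairs + PySem.Int.floordiv count 2) 0 = pairsOf A
  have hv : (PySem.Dict.counter A).values
      = (PySem.Set.ofList A).map (fun k => (A.count k : Int)) := by
    simp only [PySem.Dict.values, PySem.Dict.items_counter, List.map_map]
    rfl
  rw [hv, PySem.List.foldl_add]
  simp [pairsOf, List.map_map, Function.comp_def]

-- B-side: Set.ofList peels its head off in front of the de-duplicated tail
lemma foldl_add_cons (x : String) :
    ∀ (ys s : List String), ys.foldl PySem.Set.add (x :: s) =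
      x :: (ys.filter (fun y => ¬ y = x)).foldl PySem.Set.add s := by
  intro ys
  induction ys with
  | nil => intro s; simp
  | cons y ys ih =>
    intro s
    by_cases h : y = x
    · subst h
      simp only [List.foldl_cons, List.filter_cons]
      have : PySem.Set.add (y :: s) y = y :: s := by
        simp [PySem.Set.add, PySem.Set.contains]
      simp [ih]
    · have : PySem.Set.add (x :: s) y = x :: PySem.Set.add s y := by
        simp only [PySem.Set.add, PySem.Set.contains]
        by_cases hm : y ∈ s
        · simp [hm, h]
        · simp [hm, h]
      simp [h, this, ih]

lemma ofList_cons (x : String) (xs : List String) :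
    PySem.Set.ofList (x :: xs) = x :: PySem.Set.ofList (xs.filter (fun y => ¬ y = x)) := by
  simp only [PySem.Set.ofList, List.foldl_cons]
  have : PySem.Set.add PySem.Set.empty x = [x] := by
    simp [PySem.Set.add, PySem.Set.empty, PySem.Set.contains]
  rw [this]
  exact foldl_add_cons x xs []

lemma pairs_cons (x : String) (xs : List String) :
    pairsOf (x :: xs) = PySem.Int.floordiv ((xs.count x : Int) + 1) 2
      + pairsOf (xs.filter (fun y => ¬ y = x)) := by
  unfold pairsOf
  rw [ofList_cons, List.map_cons, List.sum_cons]
  have h1 : ((x :: xs).count x : Int) = (xs.count x : Int) + 1 := by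
    simp [List.count_cons_self]
  rw [h1]
  congr 1
  apply congrArg
  apply List.map_congr_left
  intro k hk
  rw [PySem.Set.mem_ofList, List.mem_filter] at hk
  obtain ⟨hkx, hne⟩ := hk
  have hne' : ¬ k = x := by simpa using hne
  simp [List.count_cons, hne', Ne.symm hne', List.count_filter]

-- the run-length scan computes pairsOf on any sorted suffix
lemma bLoop_eq (s : List String) : ∀ (cur : String) (run pairs : Int),
    s.Pairwise (· ≤ ·) → (∀ y ∈ s, cur ≤ y) →
    bLoop s cur run pairs =
      pairs + PySem.Int.floordiv (run + (s.count cur : Int)) 2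
        + pairsOf (s.filter (fun y => ¬ y = cur)) := by
  induction s with
  | nil =>
    intro cur run pairs _ _
    simp [bLoop, pairsOf, PySem.Set.ofList, PySem.Set.empty]
  | cons x xs ih =>
    intro cur run pairs hpw hle
    rw [List.pairwise_cons] at hpw
    obtain ⟨hx, hpw'⟩ := hpw
    by_cases h : x = cur
    · subst h
      have : (x == x) = true := by simp
      rw [bLoop, if_pos this]
      rw [ih x (run + 1) pairs hpw' hx]
      have hc : ((x :: xs).count x : Int) = (xs.count x : Int) + 1 := by
        simp [List.count_cons_self]
      rw [hc]
      have hf : List.filter (fun y => ¬ y = x) (x :: xs)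
          = List.filter (fun y => ¬ y = x) xs := by simp [List.filter_cons]
      rw [hf]
      ring_nf
    · have hcx : cur < x := lt_of_le_of_ne (hle x (by simp)) (fun e => h e.symm)
      have hbeq : (x == cur) = false := by simp [h]
      rw [bLoop, hbeq]
      simp only [Bool.false_eq_true, if_false]
      rw [ih x 1 (pairs + PySem.Int.floordiv run 2) hpw' hx]
      have hmem : cur ∉ x :: xs := by
        intro hm
        rcases List.mem_cons.mp hm with he | hm'
        · exact h he.symm
        · exact absurd (hx cur hm') (not_le_of_gt hcx)
      have hnc : (x :: xs).count cur = 0 := List.count_eq_zero.mpr hmem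
      have hfilt : List.filter (fun y => ¬ y = cur) (x :: xs) = x :: xs := by
        apply List.filter_eq_self.mpr
        intro y hy
        simp only [decide_eq_true_eq]
        intro he
        exact hmem (he ▸ hy)
      rw [hnc, hfilt, pairs_cons]
      have h1 : (1 + (xs.count x : Int)) = ((xs.count x : Int) + 1) := by ring
      rw [h1]
      push_cast
      ring_nf

lemma pairsOf_perm {s t : List String} (h : s.Perm t) : pairsOf s = pairsOf t := by
  unfold pairsOf
  have hp : (PySem.Set.ofList s).Perm (PySem.Set.ofList t) := by
    rw [List.perm_ext_iff_of_nodup (PySem.Set.nodup_ofList s) (PySem.Set.nodup_ofList t)]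
    intro a
    rw [PySem.Set.mem_ofList, PySem.Set.mem_ofList]
    exact ⟨fun ha => h.mem_iff.mp ha, fun ha => h.mem_iff.mpr ha⟩
  have hc : (fun k => PySem.Int.floordiv (s.count k : Int) 2)
      = fun k => PySem.Int.floordiv (t.count k : Int) 2 := by
    funext k
    rw [h.count_eq]
  rw [hc]
  exact (hp.map _).sum_eq

lemma solve_alt_eq_pairsOf (A : List String) : solve_alt A = pairsOf A := by
  unfold solve_alt
  rcases hs : PySem.List.sorted A (fun x => x) false with _ | ⟨x, xs⟩
  · have : A = [] := (PySem.List.sorted_eq_nil_iff A (fun x => x) false).mp hs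
    subst this
    simp [pairsOf, PySem.Set.ofList, PySem.Set.empty]
  · have hperm : (x :: xs).Perm A := hs ▸ PySem.List.sorted_perm A (fun x => x) false
    have hpw : (x :: xs).Pairwise (· ≤ ·) := by
      have := PySem.List.sorted_pairwise A (fun x => x)
      rw [hs] at this
      exact this
    rw [List.pairwise_cons] at hpw
    obtain ⟨hx, hpw'⟩ := hpw
    show bLoop xs x 1 0 = pairsOf A
    rw [bLoop_eq xs x 1 0 hpw' hx]
    rw [← pairsOf_perm hperm, pairs_cons]
    have h1 : (1 + (xs.count x : Int)) = ((xs.count x : Int) + 1) := by ring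
    rw [h1]
    ring

-- ===== VERDICT (by name: the statement is the Claim_ definition above) =====
theorem solve_spec : Claim_equal_solve := by
  intro A _
  unfold Spec_solve
  rw [solve_eq_pairsOf, solve_alt_eq_pairsOf]
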